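-- pv_equiv track=rewrite | github.com/pany1223/YSDA-Courses | Python/03.1.FunctionsStringsIO/count_util/count_util.py | count_util
-- ===== SOURCE A (Python) =====
-- import typing as tp
--
-- def count_util(text: str, flags: tp.Optional[str] = None) -> dict[str, int]:
--     """
--     :param text: text to count entities
--     :param flags: flags in command-like format - can be:
--         * -m stands for counting characters
--         * -l stands for counting lines
--         * -L stands for getting length of the longest line
--         * -w stands for counting words
--     More than one flag can be passed at the same time, for example:
--         * "-l -m"
--         * "-lLw"
--     Ommiting flags or passing empty string is equivalent to "-mlLw"
--     :return: mapping from string keys to corresponding counter, where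
--     keys are selected according to the received flags:
--         * "chars" - amount of characters
--         * "lines" - amount of lines
--         * "longest_line" - the longest line length
--         * "words" - amount of words
--     """
--     res = dict()
--     if flags:
--         flags_set = {f for f in flags if f in ['m', 'l', 'L', 'w']}
--     else:
--         flags_set = {'m', 'l', 'L', 'w'}
--
--     if 'm' in flags_set:
--         res['chars'] = len(text)
--
--     if 'l' in flags_set:
--         res['lines'] = len(text.split('\n')) - 1
--
--     if 'L' in flags_set:
--         max_len = 0
--         for line in text.split('\n'):
--             if len(line) > max_len:
--                 max_len = len(line)
--         res['longest_line'] = max_len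
--
--     if 'w' in flags_set:
--         words = 0
--         for word_raw in text.split():
--             if word_raw:
--                 words += 1
--         res['words'] = words
--
--     return res
-- ===== SOURCE B (Python) =====
-- import typing as tp
--
--
-- def count_util(text: str, flags: tp.Optional[str] = None) -> dict[str, int]:
--     """Single fused pass over text (chars/lines/longest/words in one loop)."""
--     sel = {'m', 'l', 'L', 'w'} if not flags else {c for c in 'mlLw' if c in flags}
--     chars = lines = cur = mx = words = 0
--     prev_space = True
--     for c in text:
--         chars += 1
--         if c == '\n':
--             lines += 1
--             cur = 0
--         else:
--             cur += 1
--             if cur > mx: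
--                 mx = cur
--         if c.isspace():
--             prev_space = True
--         else:
--             if prev_space:
--                 words += 1
--             prev_space = False
--     res = {}
--     if 'm' in sel:
--         res['chars'] = chars
--     if 'l' in sel:
--         res['lines'] = lines
--     if 'L' in sel:
--         res['longest_line'] = mx
--     if 'w' in sel:
--         res['words'] = words
--     return res
-- ===== Notes on version B (the rewrite author's own statement) =====
-- stated objective: alternative
-- what changed: A makes four independent scans of the text (len, two newline-splits, a whitespace-split plus a word loop); B computes chars, lines, longest line and words in one fused left-to-right pass maintaining five accumulators, counting a word on each whitespace-to-non-whitespace transition.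
import Mathlib
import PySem

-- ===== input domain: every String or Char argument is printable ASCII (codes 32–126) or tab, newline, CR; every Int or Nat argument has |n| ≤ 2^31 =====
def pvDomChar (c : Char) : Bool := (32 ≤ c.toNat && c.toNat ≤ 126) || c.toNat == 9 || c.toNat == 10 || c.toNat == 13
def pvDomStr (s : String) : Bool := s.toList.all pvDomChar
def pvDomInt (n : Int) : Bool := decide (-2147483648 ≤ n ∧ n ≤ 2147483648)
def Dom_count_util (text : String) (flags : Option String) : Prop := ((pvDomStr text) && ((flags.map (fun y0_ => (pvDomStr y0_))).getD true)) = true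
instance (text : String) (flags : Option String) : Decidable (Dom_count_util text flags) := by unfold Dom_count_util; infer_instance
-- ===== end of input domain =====

-- B replaces A's four separate scans of the text (len, two splits, a word loop)
-- by one fused left-to-right pass maintaining all four counters (objective: alternative).

-- ===== PORT A =====
def count_util (text : String) (flags : Option String) : List (String × Int) :=
  let flagsSet : List Char :=
    match flags with
    | some fs =>
      if fs.toList ≠ [] then
        PySem.Set.ofList (fs.toList.filter (fun f => decide (f ∈ ['m', 'l', 'L', 'w'])))
      else ['m', 'l', 'L', 'w']
    | none => ['m', 'l', 'L', 'w']
  let res : PySem.Dict String Int := PySem.Dict.empty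
  let res := if 'm' ∈ flagsSet then res.insert "chars" (PySem.Str.len text) else res
  let res := if 'l' ∈ flagsSet then
      res.insert "lines" (((PySem.Chars.splitOn text.toList ['\n']).length : Int) - 1)
    else res
  let res := if 'L' ∈ flagsSet then
      res.insert "longest_line"
        ((PySem.Chars.splitOn text.toList ['\n']).foldl
          (fun maxLen line => if ((line.length : Int)) > maxLen then (line.length : Int) else maxLen) 0)
    else res
  let res := if 'w' ∈ flagsSet then
      res.insert "words"
        ((PySem.Chars.split₀ text.toList).foldl
          (fun words word => if word ≠ [] then words + 1 else words) (0 : Int))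
    else res
  res.items

-- ===== PORT B =====
-- one fused pass: state = (chars, lines, cur, mx, words, prev_space)
def pvStep (st : Int × Int × Int × Int × Int × Bool) (c : Char) :
    Int × Int × Int × Int × Int × Bool :=
  let (chars, lines, cur, mx, words, prev) := st
  let chars := chars + 1
  let (lines, cur, mx) :=
    if c = '\n' then (lines + 1, (0 : Int), mx)
    else (lines, cur + 1, if cur + 1 > mx then cur + 1 else mx)
  let (words, prev) :=
    if PySem.Chars.isspace c then (words, true)
    else (if prev then words + 1 else words, false)
  (chars, lines, cur, mx, words, prev)

def count_util_alt (text : String) (flags : Option String) : List (String × Int) :=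
  let sel : List Char :=
    match flags with
    | some fs =>
      if fs.toList ≠ [] then ['m', 'l', 'L', 'w'].filter (fun c => decide (c ∈ fs.toList))
      else ['m', 'l', 'L', 'w']
    | none => ['m', 'l', 'L', 'w']
  let (chars, lines, _, mx, words, _) := text.toList.foldl pvStep (0, 0, 0, 0, 0, true)
  let res : PySem.Dict String Int := PySem.Dict.empty
  let res := if 'm' ∈ sel then res.insert "chars" chars else res
  let res := if 'l' ∈ sel then res.insert "lines" lines else res
  let res := if 'L' ∈ sel then res.insert "longest_line" mx else res
  let res := if 'w' ∈ sel then res.insert "words" words else res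
  res.items

-- ===== PRECONDITION & SPEC =====
def Spec_count_util (text : String) (flags : Option String) (out : List (String × Int)) : Prop := out = count_util_alt text flags
instance (text : String) (flags : Option String) (out : List (String × Int)) : Decidable (Spec_count_util text flags out) := by unfold Spec_count_util; infer_instance

-- ===== CLAIM (what is proved, stated in full; the proofs are below) =====
def Claim_equal_count_util : Prop := ∀ (text : String) (flags : Option String), Dom_count_util text flags → Spec_count_util text flags (count_util text flags)

-- ===== LEMMAS AND PROOFS =====

-- spec-side recursions for the components of the fused fold
def runL : List Char → Int → Int
  | [], l => l
  | c :: t, l => runL t (if c = '\n' then l + 1 else l)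

def curRun : List Char → Int → Int
  | [], cur => cur
  | c :: t, cur => curRun t (if c = '\n' then 0 else cur + 1)

def runM : List Char → Int → Int → Int
  | [], _, mx => mx
  | c :: t, cur, mx =>
    if c = '\n' then runM t 0 mx
    else runM t (cur + 1) (if cur + 1 > mx then cur + 1 else mx)

def runW : List Char → Int → Bool → Int
  | [], w, _ => w
  | c :: t, w, prev =>
    if PySem.Chars.isspace c then runW t w true
    else runW t (if prev then w + 1 else w) false

def prevRun : List Char → Bool → Bool
  | [], p => p
  | c :: t, _ => prevRun t (PySem.Chars.isspace c)

lemma pv_decomp (cs : List Char) : ∀ (c l cu m w : Int) (p : Bool),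
    cs.foldl pvStep (c, l, cu, m, w, p)
      = (c + cs.length, runL cs l, curRun cs cu, runM cs cu m, runW cs w p, prevRun cs p) := by
  induction cs with
  | nil => intro c l cu m w p; simp [runL, curRun, runM, runW, prevRun]
  | cons x t ih =>
    intro c l cu m w p
    by_cases hx : x = '\n'
    · subst hx
      simp [pvStep, ih, runL, curRun, runM, runW, prevRun,
        show PySem.Chars.isspace '\n' = true from by decide]
      omega
    · by_cases hsp : PySem.Chars.isspace x
      · simp [pvStep, hx, hsp, ih, runL, curRun, runM, runW, prevRun]
        omega
      · simp [pvStep, hx, hsp, ih, runL, curRun, runM, runW, prevRun]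
        omega

-- ---- lines ----
lemma runL_eq (cs : List Char) : ∀ l : Int, runL cs l = l + (cs.count '\n' : Int) := by
  induction cs with
  | nil => intro l; simp [runL]
  | cons x t ih =>
    intro l
    by_cases hx : x = '\n' <;> simp [runL, hx, ih] <;> omega

-- ---- the '\n' segmentation of a list of chars ----
def pvConsHead (c : Char) : List (List Char) → List (List Char)
  | [] => [[c]]
  | s :: ss => (c :: s) :: ss

def pvSegs : List Char → List (List Char)
  | [] => [[]]
  | c :: t => if c = '\n' then [] :: pvSegs t else pvConsHead c (pvSegs t)

def pvExt (p : List Char) : List (List Char) → List (List Char)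
  | [] => [p]
  | s :: ss => (p ++ s) :: ss

lemma pvSegs_ne_nil (cs : List Char) : pvSegs cs ≠ [] := by
  cases cs with
  | nil => simp [pvSegs]
  | cons c t =>
    simp only [pvSegs]
    split
    · simp
    · cases h : pvSegs t <;> simp [pvConsHead]

lemma pvExt_nil (ls : List (List Char)) (h : ls ≠ []) : pvExt [] ls = ls := by
  cases ls with
  | nil => exact absurd rfl h
  | cons s ss => simp [pvExt]

lemma pvExt_consHead (p : List Char) (c : Char) (ls : List (List Char)) (h : ls ≠ []) :
    pvExt p (pvConsHead c ls) = pvExt (p ++ [c]) ls := by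
  cases ls with
  | nil => exact absurd rfl h
  | cons s ss => simp [pvExt, pvConsHead]

lemma splitOn_go_eq (l : List Char) : ∀ (fuel : Nat) (cur : List Char) (acc : List (List Char)),
    l.length + 1 ≤ fuel →
    PySem.Chars.splitOn.go ['\n'] fuel l cur acc = acc.reverse ++ pvExt cur.reverse (pvSegs l) := by
  induction l with
  | nil =>
    intro fuel cur acc hf
    cases fuel with
    | zero => omega
    | succ f => simp [PySem.Chars.splitOn.go, pvSegs, pvExt]
  | cons c rest ih =>
    intro fuel cur acc hf
    cases fuel with
    | zero => simp at hf
    | succ f =>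
      by_cases hc : c = '\n'
      · have hpre : (['\n'] : List Char).isPrefixOf (c :: rest) = true := by
          subst hc; simp [List.isPrefixOf]
        rw [show PySem.Chars.splitOn.go ['\n'] (f + 1) (c :: rest) cur acc
              = PySem.Chars.splitOn.go ['\n'] f rest [] (cur.reverse :: acc) by
              simp [PySem.Chars.splitOn.go, hpre]]
        rw [ih f [] (cur.reverse :: acc) (by simp at hf ⊢; omega)]
        subst hc
        rw [show ([] : List Char).reverse = [] from rfl, pvExt_nil _ (pvSegs_ne_nil rest)]
        simp [pvSegs, pvExt]
      · have hpre : (['\n'] : List Char).isPrefixOf (c :: rest) = false := by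
          simp [List.isPrefixOf]
          exact fun h => hc h.symm
        rw [show PySem.Chars.splitOn.go ['\n'] (f + 1) (c :: rest) cur acc
              = PySem.Chars.splitOn.go ['\n'] f rest (c :: cur) acc by
              simp [PySem.Chars.splitOn.go, hpre]]
        rw [ih f (c :: cur) acc (by simp at hf ⊢; omega)]
        simp [pvSegs, hc, pvExt_consHead _ _ _ (pvSegs_ne_nil rest)]

lemma splitOn_eq (cs : List Char) : PySem.Chars.splitOn cs ['\n'] = pvSegs cs := by
  rw [PySem.Chars.splitOn, splitOn_go_eq cs (cs.length + 1) [] [] (by omega)]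
  simp [pvExt_nil _ (pvSegs_ne_nil cs)]

lemma segs_length (cs : List Char) : (pvSegs cs).length = cs.count '\n' + 1 := by
  induction cs with
  | nil => simp [pvSegs]
  | cons c t ih =>
    by_cases hc : c = '\n'
    · simp [pvSegs, hc, ih]
    · have h := pvSegs_ne_nil t
      cases hs : pvSegs t with
      | nil => exact absurd hs h
      | cons s ss =>
        simp [pvSegs, hc, pvConsHead, hs]
        rw [hs] at ih; simp at ih; omega

-- ---- longest line ----
def pvLens : List Char → Int → List Int
  | [], cur => [cur]
  | c :: t, cur => if c = '\n' then cur :: pvLens t 0 else pvLens t (cur + 1)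

lemma maxstep_eq (m x : Int) : (if x > m then x else m) = max m x := by
  rw [Int.max_def]; split_ifs <;> omega

lemma foldA_eq_lens (cs : List Char) : ∀ (p : List Char) (m : Int),
    List.foldl (fun maxLen line =>
        if ((line.length : Int)) > maxLen then (line.length : Int) else maxLen) m
      (pvExt p (pvSegs cs))
    = List.foldl max m (pvLens cs (p.length : Int)) := by
  induction cs with
  | nil => intro p m; simp [pvSegs, pvExt, pvLens, maxstep_eq]
  | cons c t ih =>
    intro p m
    by_cases hc : c = '\n'
    · have h1 : pvExt p (pvSegs (c :: t)) = p :: pvSegs t := by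
        simp [pvSegs, hc, pvExt]
      have h2 : pvSegs t = pvExt [] (pvSegs t) := (pvExt_nil _ (pvSegs_ne_nil t)).symm
      rw [h1, List.foldl_cons, h2, ih [], maxstep_eq]
      simp [pvLens, hc]
    · have h1 : pvExt p (pvSegs (c :: t)) = pvExt (p ++ [c]) (pvSegs t) := by
        simp [pvSegs, hc, pvExt_consHead _ _ _ (pvSegs_ne_nil t)]
      rw [h1, ih (p ++ [c])]
      simp [pvLens, hc]

lemma lens_lb (cs : List Char) : ∀ (k a : Int), k ≤ List.foldl max a (pvLens cs k) := by
  induction cs with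
  | nil => intro k a; simp [pvLens]
  | cons c t ih =>
    intro k a
    by_cases hc : c = '\n'
    · subst hc
      simp only [pvLens, if_pos, List.foldl_cons]
      calc k ≤ max a k := le_max_right a k
        _ ≤ List.foldl max (max a k) (pvLens t 0) := (PySem.List.le_foldl_max _ _).1
    · simp only [pvLens, hc, ite_false]
      calc k ≤ k + 1 := by omega
        _ ≤ List.foldl max a (pvLens t (k + 1)) := ih (k + 1) a

lemma fold_max_acc (L : List Int) : ∀ (a b : Int), a ≤ b →
    List.foldl max b L = max b (List.foldl max a L) := by
  induction L with
  | nil => intro a b h; simp [max_eq_left h]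
  | cons x L' ih =>
    intro a b h
    simp only [List.foldl_cons]
    rw [ih (max a x) (max b x) (max_le_max h le_rfl)]
    have hx : x ≤ List.foldl max (max a x) L' :=
      le_trans (le_max_right a x) (PySem.List.le_foldl_max _ _).1
    rw [max_assoc, max_eq_right hx]

lemma runM_eq (cs : List Char) : ∀ (cur mx : Int), 0 ≤ cur → cur ≤ mx →
    runM cs cur mx = List.foldl max mx (pvLens cs cur) := by
  induction cs with
  | nil => intro cur mx h0 h1; simp [runM, pvLens, max_eq_left h1]
  | cons c t ih =>
    intro cur mx h0 h1
    by_cases hc : c = '\n'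
    · subst hc
      simp only [runM, if_pos, pvLens, List.foldl_cons]
      rw [ih 0 mx le_rfl (le_trans h0 h1), max_eq_left h1]
    · simp only [runM, hc, ite_false, pvLens, maxstep_eq]
      rw [ih (cur + 1) (max mx (cur + 1)) (by omega) (le_max_right _ _)]
      rw [fold_max_acc _ mx (max mx (cur + 1)) (le_max_left _ _)]
      have h2 : mx ≤ List.foldl max mx (pvLens t (cur + 1)) := (PySem.List.le_foldl_max _ _).1
      have h3 : cur + 1 ≤ List.foldl max mx (pvLens t (cur + 1)) := lens_lb t (cur + 1) mx
      rw [max_eq_right (max_le h2 h3)]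

-- ---- words ----
lemma countW_all (L : List (List Char)) : ∀ (w : Int), (∀ s ∈ L, s ≠ []) →
    List.foldl (fun words word => if word ≠ [] then words + 1 else words) w L
      = w + L.length := by
  induction L with
  | nil => intro w _; simp
  | cons s L' ih =>
    intro w h
    have hs : s ≠ [] := h s (by simp)
    simp only [List.foldl_cons, ne_eq, hs, not_false_eq_true, ite_true]
    rw [ih (w + 1) (fun x hx => h x (by simp [hx]))]
    simp; omega

lemma split₀_go_eq (t : List Char) : ∀ (cur : List Char) (acc : List (List Char)) (w : Int),
    (∀ s ∈ acc, s ≠ []) →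
    List.foldl (fun words word => if word ≠ [] then words + 1 else words) w
        (PySem.Chars.split₀.go t cur acc)
      = runW t (w + acc.length + (if cur.isEmpty then 0 else 1)) cur.isEmpty := by
  induction t with
  | nil =>
    intro cur acc w hacc
    by_cases hcur : cur.isEmpty
    · simp only [PySem.Chars.split₀.go, hcur, ite_true, runW]
      rw [countW_all _ w (by intro s hs; exact hacc s (by simpa using hs))]
      simp
    · simp only [PySem.Chars.split₀.go, hcur]
      simp only [Bool.false_eq_true, ite_false, runW]
      have hrev : ∀ s ∈ (cur.reverse :: acc).reverse, s ≠ [] := by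
        intro s hs
        simp at hs
        rcases hs with hs | hs
        · exact hacc s hs
        · subst hs; simp; intro h; subst h; simp at hcur
      rw [countW_all _ w hrev]
      simp; omega
  | cons c rest ih =>
    intro cur acc w hacc
    by_cases hsp : PySem.Chars.isspace c
    · by_cases hcur : cur.isEmpty
      · rw [show PySem.Chars.split₀.go (c :: rest) cur acc = PySem.Chars.split₀.go rest [] acc by
            simp [PySem.Chars.split₀.go, hsp, hcur]]
        rw [ih [] acc w hacc]
        simp [runW, hsp, hcur]
      · rw [show PySem.Chars.split₀.go (c :: rest) cur acc
              = PySem.Chars.split₀.go rest [] (cur.reverse :: acc) by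
            simp [PySem.Chars.split₀.go, hsp, hcur]]
        have hacc' : ∀ s ∈ cur.reverse :: acc, s ≠ [] := by
          intro s hs
          rcases List.mem_cons.mp hs with hs | hs
          · subst hs; simp; intro h; subst h; simp at hcur
          · exact hacc s hs
        rw [ih [] (cur.reverse :: acc) w hacc']
        simp [runW, hsp, hcur]
        ring_nf
    · rw [show PySem.Chars.split₀.go (c :: rest) cur acc
            = PySem.Chars.split₀.go rest (c :: cur) acc by
          simp [PySem.Chars.split₀.go, hsp]]
      rw [ih (c :: cur) acc w hacc]
      by_cases hcur : cur.isEmpty <;> simp [runW, hsp, hcur]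

lemma wordsA_eq (cs : List Char) :
    List.foldl (fun words word => if word ≠ [] then words + 1 else words) (0 : Int)
        (PySem.Chars.split₀ cs)
      = runW cs 0 true := by
  rw [PySem.Chars.split₀, split₀_go_eq cs [] [] 0 (by simp)]
  simp

-- ---- flag-set membership ----
lemma flag_memA (fs : List Char) (c : Char) (hc : c ∈ (['m', 'l', 'L', 'w'] : List Char)) :
    (c ∈ PySem.Set.ofList (fs.filter (fun f => decide (f ∈ (['m', 'l', 'L', 'w'] : List Char)))))
      ↔ c ∈ fs := by
  rw [PySem.Set.mem_ofList]
  fin_cases hc <;> simp [List.mem_filter]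

lemma flag_memB (fs : List Char) (c : Char) (hc : c ∈ (['m', 'l', 'L', 'w'] : List Char)) :
    (c ∈ (['m', 'l', 'L', 'w'] : List Char).filter (fun x => decide (x ∈ fs))) ↔ c ∈ fs := by
  fin_cases hc <;> simp [List.mem_filter]

-- ===== VERDICT (by name: the statement is the Claim_ definition above) =====
theorem count_util_spec : Claim_equal_count_util := by
  intro text flags _
  unfold Spec_count_util count_util count_util_alt
  rw [pv_decomp]
  have hchars : PySem.Str.len text = 0 + (text.toList.length : Int) := by
    simp [PySem.Str.len]
  have hlines : ((PySem.Chars.splitOn text.toList ['\n']).length : Int) - 1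
      = runL text.toList 0 := by
    rw [splitOn_eq, segs_length, runL_eq]; push_cast; ring
  have hmx : (PySem.Chars.splitOn text.toList ['\n']).foldl
        (fun maxLen line => if ((line.length : Int)) > maxLen then (line.length : Int) else maxLen) 0
      = runM text.toList 0 0 := by
    rw [splitOn_eq, ← pvExt_nil _ (pvSegs_ne_nil text.toList), foldA_eq_lens, runM_eq _ _ _ le_rfl le_rfl]
    simp
  have hwords := wordsA_eq text.toList
  rw [hchars, hlines, hmx, hwords]
  match flags with
  | none => rfl
  | some fs =>
    by_cases hfs : fs.toList = []
    · simp [hfs]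
    · simp only [hfs, ne_eq, not_false_eq_true, if_true]
      simp only [flag_memA fs.toList 'm' (by decide), flag_memA fs.toList 'l' (by decide),
        flag_memA fs.toList 'L' (by decide), flag_memA fs.toList 'w' (by decide),
        flag_memB fs.toList 'm' (by decide), flag_memB fs.toList 'l' (by decide),
        flag_memB fs.toList 'L' (by decide), flag_memB fs.toList 'w' (by decide)]
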